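-- pv_equiv track=rewrite | github.com/valentmario/Expenses | Common/Common_Functions.py | Compact_Descr_String
-- ===== SOURCE A (Python) =====
-- def Compact_Descr_String(Descr):
--     Type = type(Descr)
--     if Type is None or Type is not str:
--         return ''
--     # if Descr is None:
--     #     return ' '
--     myStr = ''
--     nSpace = 0
--     for Char in Descr:
--         if Char == ' ':
--             if not nSpace:
--                 myStr += ' '
--                 nSpace += 1
--         else:
--             nSpace = 0
--             if '0' <= Char <= '9':
--                 myStr += Char
--             elif 'A' <= Char <= 'Z':
--                 myStr += Char
--             elif 'a' <= Char <= 'z':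
--                 myStr += Char.upper()
--             elif Char == '#':
--                 myStr += Char
--     return myStr
-- ===== SOURCE B (Python) =====
-- def Compact_Descr_String(Descr):
--     if type(Descr) is not str:
--         return ''
--     # pass 1: collapse runs of consecutive spaces (keep a space only if the previous char isn't a space)
--     squeezed = [c for prev, c in zip('\0' + Descr, Descr) if c != ' ' or prev != ' ']
--     # pass 2: stateless character filter/translate
--     out = []
--     for c in squeezed:
--         if c == ' ' or '0' <= c <= '9' or 'A' <= c <= 'Z' or c == '#':
--             out.append(c)
--         elif 'a' <= c <= 'z':
--             out.append(c.upper())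
--     return ''.join(out)
-- ===== Notes on version B (the rewrite author's own statement) =====
-- stated objective: simpler
-- what changed: A's single stateful loop with an nSpace flag is replaced by two stateless passes: first collapse runs of consecutive spaces by zipping the string with itself shifted by one, then a per-character filter/translate with no loop-carried state.
import Mathlib
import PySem

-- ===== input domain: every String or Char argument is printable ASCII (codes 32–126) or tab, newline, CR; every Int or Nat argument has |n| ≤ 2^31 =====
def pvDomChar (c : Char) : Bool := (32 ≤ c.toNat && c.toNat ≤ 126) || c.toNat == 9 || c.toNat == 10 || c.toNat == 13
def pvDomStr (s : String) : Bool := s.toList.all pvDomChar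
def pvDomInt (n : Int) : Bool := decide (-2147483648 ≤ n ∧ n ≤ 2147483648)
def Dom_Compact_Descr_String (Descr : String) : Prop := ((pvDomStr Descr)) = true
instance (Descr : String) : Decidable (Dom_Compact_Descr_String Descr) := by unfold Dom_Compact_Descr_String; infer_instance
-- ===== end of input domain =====

-- B replaces A's stateful nSpace machine by two stateless passes: squeeze runs of
-- consecutive spaces (via a zip with the shifted string), then a per-character filter/translate.
-- Objective: simpler (no loop-carried state). Return value only; no mutation involved.

-- ===== PORT A =====
-- loop body of A's for-loop, named: state = (myStr as char list, nSpace)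
def pvStepA (st : List Char × Int) (c : Char) : List Char × Int :=
  if c = ' ' then
    if st.2 = 0 then (st.1 ++ [' '], st.2 + 1) else st
  else
    -- nSpace = 0, then the elif chain
    if '0' ≤ c ∧ c ≤ '9' then (st.1 ++ [c], 0)
    else if 'A' ≤ c ∧ c ≤ 'Z' then (st.1 ++ [c], 0)
    else if 'a' ≤ c ∧ c ≤ 'z' then (st.1 ++ [PySem.Chars.upperChar c], 0)
    else if c = '#' then (st.1 ++ [c], 0)
    else (st.1, 0)

-- (the 'type(Descr) is not str' guard is vacuous under the type convention: Descr : String)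
def Compact_Descr_String (Descr : String) : String :=
  String.mk (Descr.toList.foldl pvStepA ([], 0)).1

-- ===== PORT B =====
-- B's pass-2 loop body: keep ' ', digits, uppercase, '#' as-is; uppercase a-z; drop the rest
def pvKeep (c : Char) : Option Char :=
  if c = ' ' ∨ ('0' ≤ c ∧ c ≤ '9') ∨ ('A' ≤ c ∧ c ≤ 'Z') ∨ c = '#' then some c
  else if 'a' ≤ c ∧ c ≤ 'z' then some (PySem.Chars.upperChar c) else none

def Compact_Descr_String_alt (Descr : String) : String :=
  let l := Descr.toList
  -- pass 1: zip '\0'+s with s, keep c unless both c and its predecessor are ' '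
  let squeezed := ((Char.ofNat 0 :: l).zip l).filterMap
      (fun pc => if pc.2 ≠ ' ' ∨ pc.1 ≠ ' ' then some pc.2 else none)
  -- pass 2: stateless filter/translate
  String.mk (squeezed.filterMap pvKeep)

-- ===== PRECONDITION & SPEC =====
def Spec_Compact_Descr_String (Descr : String) (out : String) : Prop := out = Compact_Descr_String_alt Descr
instance (Descr : String) (out : String) : Decidable (Spec_Compact_Descr_String Descr out) := by unfold Spec_Compact_Descr_String; infer_instance

-- ===== CLAIM (what is proved, stated in full; the proofs are below) =====
def Claim_equal_Compact_Descr_String : Prop := ∀ (Descr : String), Dom_Compact_Descr_String Descr → Spec_Compact_Descr_String Descr (Compact_Descr_String Descr)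

-- ===== LEMMAS AND PROOFS =====

-- recursive form of B's pass 1: squeeze with explicit previous char
def pvSq (p : Char) : List Char → List Char
  | [] => []
  | c :: t => (if c ≠ ' ' ∨ p ≠ ' ' then [c] else []) ++ pvSq c t

lemma pv_zip_eq_sq (p : Char) (l : List Char) :
    ((p :: l).zip l).filterMap (fun pc => if pc.2 ≠ ' ' ∨ pc.1 ≠ ' ' then some pc.2 else none)
      = pvSq p l := by
  induction l generalizing p with
  | nil => simp [pvSq]
  | cons c t ih =>
    simp only [List.zip_cons_cons, List.filterMap_cons, pvSq, ih]
    split_ifs <;> simp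

lemma pv_step_ne_space (c : Char) (h : c ≠ ' ') (acc : List Char) (n : Int) :
    pvStepA (acc, n) c = (acc ++ (pvKeep c).toList, 0) := by
  by_cases hd : '0' ≤ c ∧ c ≤ '9'
  · simp [pvStepA, pvKeep, hd, if_neg h]
  · by_cases hu : 'A' ≤ c ∧ c ≤ 'Z'
    · simp [pvStepA, pvKeep, hd, hu, if_neg h]
    · by_cases hl : 'a' ≤ c ∧ c ≤ 'z'
      · have hh : c ≠ '#' := by rintro rfl; exact absurd hl (by decide)
        simp [pvStepA, pvKeep, hd, hu, hl, hh, if_neg h]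
      · by_cases hh : c = '#'
        · subst hh; simp [pvStepA, pvKeep]
        · simp [pvStepA, pvKeep, hd, hu, hl, hh, if_neg h]

-- loop invariant: nSpace = 1 iff the previously processed char is ' '
lemma pv_loopA (l : List Char) (acc : List Char) (p : Char) :
    ∃ q : Char, l.foldl pvStepA (acc, if p = ' ' then (1 : Int) else 0)
      = (acc ++ (pvSq p l).filterMap pvKeep, if q = ' ' then (1 : Int) else 0) := by
  induction l generalizing acc p with
  | nil => exact ⟨p, by simp [pvSq]⟩
  | cons c t ih =>
    by_cases hc : c = ' '
    · subst hc
      by_cases hp : p = ' '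
      · -- consecutive space: state unchanged, squeezed drops c
        subst hp
        obtain ⟨q, hq⟩ := ih acc ' '
        refine ⟨q, ?_⟩
        have hstep : pvStepA (acc, if (' ' : Char) = ' ' then (1 : Int) else 0) ' '
            = (acc, if (' ' : Char) = ' ' then (1 : Int) else 0) := by
          simp [pvStepA]
        rw [List.foldl_cons, hstep, hq]
        simp [pvSq]
      · -- first space after non-space: append ' ', set nSpace = 1
        obtain ⟨q, hq⟩ := ih (acc ++ [' ']) ' '
        refine ⟨q, ?_⟩
        have hstep : pvStepA (acc, if p = ' ' then (1 : Int) else 0) ' '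
            = (acc ++ [' '], if (' ' : Char) = ' ' then (1 : Int) else 0) := by
          simp [pvStepA, hp]
        rw [List.foldl_cons, hstep, hq]
        simp [pvSq, hp, pvKeep]
    · -- non-space: reset nSpace, append pvKeep c
      obtain ⟨q, hq⟩ := ih (acc ++ (pvKeep c).toList) c
      refine ⟨q, ?_⟩
      have h0 : (if c = ' ' then (1 : Int) else 0) = 0 := by simp [hc]
      rw [List.foldl_cons, pv_step_ne_space c hc, ← h0, hq]
      simp only [pvSq, hc, ne_eq, not_false_iff, true_or, if_pos, List.singleton_append,
        List.filterMap_cons]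
      cases hk : pvKeep c <;> simp

-- ===== VERDICT (by name: the statement is the Claim_ definition above) =====
theorem Compact_Descr_String_spec : Claim_equal_Compact_Descr_String := by
  unfold Claim_equal_Compact_Descr_String
  intro Descr _
  unfold Spec_Compact_Descr_String Compact_Descr_String Compact_Descr_String_alt
  have h0 : (Char.ofNat 0) ≠ ' ' := by decide
  obtain ⟨q, hq⟩ := pv_loopA Descr.toList [] (Char.ofNat 0)
  rw [if_neg h0] at hq
  rw [hq]
  simp [pv_zip_eq_sq]
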